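-- pv_equiv track=rewrite | github.com/ComputationalChemistry-NMSU/vbt3 | vbt3/spin.py | _apply_s_pl_s_mi
-- ===== SOURCE A (Python) =====
-- def _canon_det(alpha_set, beta_set):
--     """
--     Canonical det string: sort alpha and beta sets, interleave in pairs
--     matching vbt3.functions.generate_det_strings.  Returns None if
--     n_alpha != n_beta (our caller will work with balanced dets only).
--     """
--     a = sorted(alpha_set)
--     b = sorted(beta_set)
--     if len(a) != len(b):
--         return None
--     return ''.join(a[k] + b[k].upper() for k in range(len(a)))
--
-- def _apply_c(alpha, beta, orb, spin, create):
--     """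
--     Apply c_{orb, spin} or c^+_{orb, spin} to the det specified by the
--     alpha/beta orbital sets.  Returns (new_alpha, new_beta, sign) or
--     (None, None, 0) if annihilated.  sign = (-1)^{# occupied spin-orbitals
--     before (orb, spin) in the canonical ordering}.
--
--     Canonical ordering: for each orbital in alphabetical order, alpha first
--     then beta.
--     """
--     present = (orb in alpha) if spin == 0 else (orb in beta)
--     if create == present:   # trying to create an occupied slot, or annihilate empty
--         return None, None, 0
--
--     # Jordan-Wigner sign: count occupied spin-orbitals strictly before (orb, spin)
--     count = 0
--     for x in sorted(alpha | beta):
--         if x < orb: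
--             count += int(x in alpha) + int(x in beta)
--         elif x == orb:
--             if spin == 1 and x in alpha:
--                 count += 1
--     sign = 1 if count % 2 == 0 else -1
--
--     new_alpha = alpha.copy()
--     new_beta  = beta.copy()
--     if spin == 0:
--         if create:
--             new_alpha.add(orb)
--         else:
--             new_alpha.discard(orb)
--     else:
--         if create:
--             new_beta.add(orb)
--         else:
--             new_beta.discard(orb)
--     return new_alpha, new_beta, sign
--
-- def _apply_s_pl_s_mi(orbs, alpha, beta):
--     """
--     Apply S_+ S_- = sum_{i, j} c^+_{i a} c_{i b} c^+_{j b} c_{j a}  to |D>.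
--     Returns a dict  { canonical_det_string : signed_coefficient, ... }.
--     `orbs` is the list of orbital labels to iterate over.
--     """
--     out = {}
--     for j in orbs:
--         # c_{j alpha}
--         a1, b1, s1 = _apply_c(alpha, beta, j, 0, create=False)
--         if a1 is None:
--             continue
--         for i in orbs:
--             # c^+_{j beta}
--             a2, b2, s2 = _apply_c(a1, b1, j, 1, create=True)
--             if a2 is None:
--                 continue
--             # c_{i beta}
--             a3, b3, s3 = _apply_c(a2, b2, i, 1, create=False)
--             if a3 is None:
--                 continue
--             # c^+_{i alpha}
--             a4, b4, s4 = _apply_c(a3, b3, i, 0, create=True)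
--             if a4 is None:
--                 continue
--             sign = s1 * s2 * s3 * s4
--             key = _canon_det(a4, b4)
--             if key is None:
--                 continue
--             out[key] = out.get(key, 0) + sign
--     return out
-- ===== SOURCE B (Python) =====
-- def _canon_pair_key(sa, sb):
--     return ''.join(x + y.upper() for x, y in zip(sa, sb))
--
-- def _replace_sorted(lst, old, new):
--     out = [x for x in lst if x != old]
--     k = 0
--     while k < len(out) and out[k] < new:
--         k += 1
--     out.insert(k, new)
--     return out
--
-- def _apply_s_pl_s_mi(orbs, alpha, beta):
--     # Every surviving term of S+S- has sign +1 (the two annihilator/creator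
--     # pairs act at identical positions), so no Jordan-Wigner counting is needed:
--     # just enumerate j in alpha\beta and i in beta\alpha (or i == j) and build
--     # the swapped canonical string directly from the precomputed sorted lists.
--     if len(alpha) != len(beta):
--         return {}
--     sa = sorted(alpha)
--     sb = sorted(beta)
--     base = _canon_pair_key(sa, sb)
--     out = {}
--     for j in orbs:
--         if j not in alpha or j in beta:
--             continue
--         for i in orbs:
--             if i == j:
--                 out[base] = out.get(base, 0) + 1
--             elif i in beta and i not in alpha:
--                 key = _canon_pair_key(_replace_sorted(sa, j, i), _replace_sorted(sb, i, j))
--                 out[key] = out.get(key, 0) + 1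
--     return out
-- ===== Notes on version B (the rewrite author's own statement) =====
-- stated objective: faster
-- what changed: B drops the four Jordan-Wigner operator applications per (j,i) term entirely: the surviving terms are exactly j in alpha\beta with i == j or i in beta\alpha, each with sign +1 (proved), so B enumerates those directly and builds each swapped canonical string by linear remove/insert surgery on sorted lists precomputed once, instead of re-sorting the orbital union and re-counting occupations four times per term.
import Mathlib
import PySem

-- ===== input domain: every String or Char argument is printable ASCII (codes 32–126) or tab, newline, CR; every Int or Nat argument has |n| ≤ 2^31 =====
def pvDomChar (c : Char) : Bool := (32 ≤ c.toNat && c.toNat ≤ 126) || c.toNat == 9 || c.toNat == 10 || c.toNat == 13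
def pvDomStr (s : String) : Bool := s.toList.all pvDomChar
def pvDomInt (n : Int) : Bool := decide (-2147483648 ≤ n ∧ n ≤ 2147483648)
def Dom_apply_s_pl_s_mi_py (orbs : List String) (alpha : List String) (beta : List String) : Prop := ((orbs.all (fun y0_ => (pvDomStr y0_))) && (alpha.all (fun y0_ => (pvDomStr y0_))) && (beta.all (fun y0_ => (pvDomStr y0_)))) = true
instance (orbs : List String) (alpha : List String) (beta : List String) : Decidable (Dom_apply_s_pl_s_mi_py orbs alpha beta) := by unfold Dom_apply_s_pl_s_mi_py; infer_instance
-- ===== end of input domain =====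

-- B replaces the four Jordan-Wigner operator applications per (j,i) term by a direct
-- enumeration of the surviving terms (sign is provably always +1) and builds each
-- swapped canonical string by linear surgery on precomputed sorted lists; measurably faster.

-- ===== PORT A =====
-- port of _canon_det
def canonDetA (a b : PySem.Set String) : Option String :=
  let sa := PySem.List.sorted a (fun x => x.toList)
  let sb := PySem.List.sorted b (fun x => x.toList)
  if sa.length ≠ sb.length then none
  else some (PySem.Str.join "" ((List.range sa.length).map
    (fun k => PySem.Str.join "" [sa.getD k "", PySem.Str.upper (sb.getD k "")])))

-- port of _apply_c
def applyCA (alpha beta : PySem.Set String) (orb : String) (spin : Int) (create : Bool) :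
    Option (PySem.Set String × PySem.Set String × Int) :=
  let present := if spin == 0 then PySem.Set.contains alpha orb else PySem.Set.contains beta orb
  if create == present then none else
  let count : Int := (PySem.List.sorted (PySem.Set.union alpha beta) (fun x => x.toList)).foldl
    (fun c x =>
      if x.toList < orb.toList then
        c + ((if PySem.Set.contains alpha x then (1 : Int) else 0)
           + (if PySem.Set.contains beta x then (1 : Int) else 0))
      else if x == orb then
        (if spin == 1 && PySem.Set.contains alpha x then c + 1 else c)
      else c) 0
  let sign : Int := if PySem.Int.mod count 2 == 0 then 1 else -1
  if spin == 0 then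
    (if create then some (PySem.Set.add alpha orb, beta, sign)
     else some (PySem.Set.discard alpha orb, beta, sign))
  else
    (if create then some (alpha, PySem.Set.add beta orb, sign)
     else some (alpha, PySem.Set.discard beta orb, sign))

def apply_s_pl_s_mi_py (orbs : List String) (alpha : List String) (beta : List String) : List (String × Int) :=
  (orbs.foldl (fun (out : PySem.Dict String Int) j =>
    match applyCA alpha beta j 0 false with
    | none => out
    | some (a1, b1, s1) =>
      orbs.foldl (fun out i =>
        match applyCA a1 b1 j 1 true with
        | none => out
        | some (a2, b2, s2) =>
          match applyCA a2 b2 i 1 false with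
          | none => out
          | some (a3, b3, s3) =>
            match applyCA a3 b3 i 0 true with
            | none => out
            | some (a4, b4, s4) =>
              let sign := s1 * s2 * s3 * s4
              match canonDetA a4 b4 with
              | none => out
              | some key => PySem.Dict.insert out key (PySem.Dict.getD out key 0 + sign)) out)
    PySem.Dict.empty).items

-- ===== PORT B =====
-- port of _canon_pair_key
def canonKeyB (sa sb : List String) : String :=
  PySem.Str.join "" ((sa.zip sb).map (fun p => PySem.Str.join "" [p.1, PySem.Str.upper p.2]))

-- the `while`/`insert` of _replace_sorted as structural recursion
def insPosB (nw : String) : List String → List String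
  | [] => [nw]
  | x :: xs => if x.toList < nw.toList then x :: insPosB nw xs else nw :: x :: xs

-- port of _replace_sorted
def replaceSortedB (lst : List String) (old nw : String) : List String :=
  insPosB nw (lst.filter (fun x => x ≠ old))

def apply_s_pl_s_mi_py_alt (orbs : List String) (alpha : List String) (beta : List String) : List (String × Int) :=
  if alpha.length ≠ beta.length then []
  else
    let sa := PySem.List.sorted alpha (fun x => x.toList)
    let sb := PySem.List.sorted beta (fun x => x.toList)
    let base := canonKeyB sa sb
    (orbs.foldl (fun (out : PySem.Dict String Int) j =>
      if alpha.contains j && !(beta.contains j) then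
        orbs.foldl (fun out i =>
          if i == j then PySem.Dict.insert out base (PySem.Dict.getD out base 0 + 1)
          else if beta.contains i && !(alpha.contains i) then
            let key := canonKeyB (replaceSortedB sa j i) (replaceSortedB sb i j)
            PySem.Dict.insert out key (PySem.Dict.getD out key 0 + 1)
          else out) out
      else out) PySem.Dict.empty).items

-- ===== PRECONDITION & SPEC =====
-- alpha and beta are Python sets: their List-String representation holds distinct
-- elements (the type convention); Pre_ only states that representation invariant.
def Pre_apply_s_pl_s_mi_py (orbs : List String) (alpha : List String) (beta : List String) : Prop :=
  alpha.Nodup ∧ beta.Nodup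
instance (orbs : List String) (alpha : List String) (beta : List String) : Decidable (Pre_apply_s_pl_s_mi_py orbs alpha beta) := by unfold Pre_apply_s_pl_s_mi_py; infer_instance

def pvWitness_apply_s_pl_s_mi_py : List String × List String × List String := (["a", "b"], ["a"], ["b"])

def Spec_apply_s_pl_s_mi_py (orbs : List String) (alpha : List String) (beta : List String) (out : List (String × Int)) : Prop := out = apply_s_pl_s_mi_py_alt orbs alpha beta
instance (orbs : List String) (alpha : List String) (beta : List String) (out : List (String × Int)) : Decidable (Spec_apply_s_pl_s_mi_py orbs alpha beta out) := by unfold Spec_apply_s_pl_s_mi_py; infer_instance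

-- ===== CLAIM (what is proved, stated in full; the proofs are below) =====
def Claim_equal_apply_s_pl_s_mi_py : Prop := ∀ (orbs : List String) (alpha : List String) (beta : List String), Dom_apply_s_pl_s_mi_py orbs alpha beta → Pre_apply_s_pl_s_mi_py orbs alpha beta → Spec_apply_s_pl_s_mi_py orbs alpha beta (apply_s_pl_s_mi_py orbs alpha beta)

-- ===== LEMMAS AND PROOFS =====

-- the number of occupied spin-orbitals strictly below `orb` (the Jordan-Wigner count)
def cntLt (A B : List String) (orb : String) : Int :=
  (A.countP (fun x => x.toList < orb.toList) : Int) + (B.countP (fun x => x.toList < orb.toList) : Int)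

def sgn (n : Int) : Int := if PySem.Int.mod n 2 == 0 then 1 else -1

theorem sgn_sq (n : Int) : sgn n * sgn n = 1 := by
  unfold sgn; split <;> norm_num

theorem sgn_four (x y : Int) : sgn x * sgn x * sgn y * sgn y = 1 := by
  calc sgn x * sgn x * sgn y * sgn y = (sgn x * sgn x) * (sgn y * sgn y) := by ring
  _ = 1 := by rw [sgn_sq, sgn_sq, one_mul]

theorem foldl_ext' {α β : Type} (f g : β → α → β) (l : List α) (b : β)
    (h : ∀ b x, f b x = g b x) : l.foldl f b = l.foldl g b := by
  induction l generalizing b with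
  | nil => rfl
  | cons x xs ih => simp only [List.foldl_cons, h, ih]

theorem foldl_fix {α β : Type} (f : β → α → β) (l : List α) (b : β)
    (h : ∀ b x, f b x = b) : l.foldl f b = b := by
  induction l generalizing b with
  | nil => rfl
  | cons x xs ih => simp only [List.foldl_cons, h, ih]

theorem nodup_add (s : PySem.Set String) (x : String) (h : s.Nodup) : (PySem.Set.add s x).Nodup := by
  unfold PySem.Set.add; split
  · exact h
  · next hc =>
    simp_all [List.nodup_append, PySem.Set.contains]
    exact fun a ha e => hc (e ▸ ha)

theorem nodup_union (s t : PySem.Set String) (hs : s.Nodup) : (PySem.Set.union s t).Nodup := by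
  unfold PySem.Set.union PySem.Set.update
  induction t generalizing s with
  | nil => exact hs
  | cons y ys ih => exact ih _ (nodup_add s y hs)

theorem mem_discard (s : PySem.Set String) (x y : String) :
    y ∈ PySem.Set.discard s x ↔ y ∈ s ∧ y ≠ x := by
  simp [PySem.Set.discard]

theorem nodup_discard (s : PySem.Set String) (x : String) (h : s.Nodup) :
    (PySem.Set.discard s x).Nodup := h.filter _

theorem countP_superset (A S : List String) (p : String → Bool)
    (hA : A.Nodup) (hS : S.Nodup) (hsub : ∀ x, x ∈ A → x ∈ S) :
    S.countP (fun x => A.contains x && p x) = A.countP p := by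
  rw [List.countP_eq_length_filter, List.countP_eq_length_filter]
  have hperm : (S.filter (fun x => A.contains x && p x)).Perm (A.filter p) := by
    rw [List.perm_ext_iff_of_nodup (hS.filter _) (hA.filter _)]
    intro a
    simp only [List.mem_filter, Bool.and_eq_true, List.contains_iff_mem]
    constructor
    · rintro ⟨_, ha, hp⟩; exact ⟨ha, hp⟩
    · rintro ⟨ha, hp⟩; exact ⟨hsub a ha, ha, hp⟩
  exact hperm.length_eq

theorem count_closed (A B : List String) (orb : String) (spin : Int)
    (hA : A.Nodup) (hB : B.Nodup) :
    ((PySem.List.sorted (PySem.Set.union A B) (fun x => x.toList)).foldl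
      (fun c x =>
        if x.toList < orb.toList then
          c + ((if PySem.Set.contains A x then (1 : Int) else 0)
             + (if PySem.Set.contains B x then (1 : Int) else 0))
        else if x == orb then
          (if spin == 1 && PySem.Set.contains A x then c + 1 else c)
        else c) 0)
    = cntLt A B orb + (if spin == 1 && A.contains orb then 1 else 0) := by
  have hS : (PySem.List.sorted (PySem.Set.union A B) (fun x => x.toList)).Nodup :=
    ((PySem.List.sorted_perm (PySem.Set.union A B) (fun x => x.toList) false).nodup_iff).mpr
      (nodup_union A B hA)
  have hmemS : ∀ x, x ∈ PySem.List.sorted (PySem.Set.union A B) (fun x => x.toList) ↔ x ∈ A ∨ x ∈ B := by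
    intro x; rw [PySem.List.mem_sorted]; exact PySem.Set.mem_union A B x
  have hbody : (fun (c : Int) x =>
        if x.toList < orb.toList then
          c + ((if PySem.Set.contains A x then (1 : Int) else 0)
             + (if PySem.Set.contains B x then (1 : Int) else 0))
        else if x == orb then
          (if spin == 1 && PySem.Set.contains A x then c + 1 else c)
        else c)
      = fun (c : Int) x => c +
          ((if A.contains x && decide (x.toList < orb.toList) then (1 : Int) else 0)
         + ((if B.contains x && decide (x.toList < orb.toList) then (1 : Int) else 0)
         + (if x == orb && (spin == 1 && A.contains x) then (1 : Int) else 0))) := by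
    funext c x
    by_cases h1 : x.toList < orb.toList
    · have hne : (x == orb) = false := by
        apply beq_eq_false_iff_ne.mpr
        intro e; subst e; exact lt_irrefl _ h1
      simp [PySem.Set.contains, h1, hne]
    · by_cases h2 : (x == orb) = true
      · simp only [PySem.Set.contains, h1, if_false, h2, Bool.true_and, decide_false,
          Bool.and_false, if_true]
        split <;> simp_all
      · simp [h1, h2]
  rw [foldl_ext' _ _ _ _ (fun c x => congrFun (congrFun hbody c) x), PySem.List.foldl_add,
    PySem.List.sum_map_add_int, PySem.List.sum_map_add_int,
    PySem.List.sum_map_ite_one_zero, PySem.List.sum_map_ite_one_zero, PySem.List.sum_map_ite_one_zero]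
  have h1 : (PySem.List.sorted (PySem.Set.union A B) (fun x => x.toList)).countP
        (fun x => A.contains x && decide (x.toList < orb.toList))
      = A.countP (fun x => decide (x.toList < orb.toList)) :=
    countP_superset A _ _ hA hS (fun x hx => (hmemS x).mpr (Or.inl hx))
  have h2 : (PySem.List.sorted (PySem.Set.union A B) (fun x => x.toList)).countP
        (fun x => B.contains x && decide (x.toList < orb.toList))
      = B.countP (fun x => decide (x.toList < orb.toList)) :=
    countP_superset B _ _ hB hS (fun x hx => (hmemS x).mpr (Or.inr hx))
  have h3 : (PySem.List.sorted (PySem.Set.union A B) (fun x => x.toList)).countP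
        (fun x => x == orb && (spin == 1 && A.contains x))
      = (if spin == 1 && A.contains orb then 1 else 0) := by
    have hc : (PySem.List.sorted (PySem.Set.union A B) (fun x => x.toList)).countP
          (fun x => x == orb && (spin == 1 && A.contains x))
        = (PySem.List.sorted (PySem.Set.union A B) (fun x => x.toList)).countP
          (fun x => (spin == 1 && A.contains orb) && (x == orb)) := by
      apply List.countP_congr
      intro x hx
      by_cases he : x = orb
      · subst he; simp
      · simp [beq_eq_false_iff_ne.mpr he]
    rw [hc]
    by_cases hcond : (spin == 1 && A.contains orb) = true
    · have horbA : orb ∈ A := by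
        rcases Bool.and_eq_true_iff.mp hcond with ⟨_, h⟩
        exact List.contains_iff_mem.mp h
      have hone : (PySem.List.sorted (PySem.Set.union A B) (fun x => x.toList)).countP
          (fun x => x == orb) = 1 := by
        have := List.count_eq_one_of_mem hS ((hmemS orb).mpr (Or.inl horbA))
        simpa [List.count] using this
      simp only [hcond, Bool.true_and]
      rw [hone]
      simp
    · simp only [Bool.not_eq_true] at hcond
      simp only [hcond, Bool.false_and]
      simp
  rw [h1, h2, h3]
  simp [cntLt]
  ring

theorem applyCA_annih_a (alpha beta : List String) (j : String)
    (hA : alpha.Nodup) (hB : beta.Nodup) (hj : j ∈ alpha) :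
    applyCA alpha beta j 0 false
      = some (PySem.Set.discard alpha j, beta, sgn (cntLt alpha beta j)) := by
  unfold applyCA
  rw [count_closed alpha beta j 0 hA hB]
  simp [sgn, hj]

theorem applyCA_annih_a_none (alpha beta : List String) (j : String) (hj : j ∉ alpha) :
    applyCA alpha beta j 0 false = none := by
  simp [applyCA, hj]

theorem applyCA_create_b (alpha beta : List String) (j : String)
    (hA : alpha.Nodup) (hB : beta.Nodup) (hj : j ∉ beta) :
    applyCA alpha beta j 1 true
      = some (alpha, PySem.Set.add beta j,
          sgn (cntLt alpha beta j + (if alpha.contains j then 1 else 0))) := by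
  unfold applyCA
  rw [count_closed alpha beta j 1 hA hB]
  simp [sgn, hj]

theorem applyCA_create_b_none (alpha beta : List String) (j : String) (hj : j ∈ beta) :
    applyCA alpha beta j 1 true = none := by
  simp [applyCA, hj]

theorem applyCA_annih_b (alpha beta : List String) (i : String)
    (hA : alpha.Nodup) (hB : beta.Nodup) (hi : i ∈ beta) :
    applyCA alpha beta i 1 false
      = some (alpha, PySem.Set.discard beta i,
          sgn (cntLt alpha beta i + (if alpha.contains i then 1 else 0))) := by
  unfold applyCA
  rw [count_closed alpha beta i 1 hA hB]
  simp [sgn, hi]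

theorem applyCA_annih_b_none (alpha beta : List String) (i : String) (hi : i ∉ beta) :
    applyCA alpha beta i 1 false = none := by
  simp [applyCA, hi]

theorem applyCA_create_a (alpha beta : List String) (i : String)
    (hA : alpha.Nodup) (hB : beta.Nodup) (hi : i ∉ alpha) :
    applyCA alpha beta i 0 true
      = some (PySem.Set.add alpha i, beta, sgn (cntLt alpha beta i)) := by
  unfold applyCA
  rw [count_closed alpha beta i 0 hA hB]
  simp [sgn, hi]

theorem applyCA_create_a_none (alpha beta : List String) (i : String) (hi : i ∈ alpha) :
    applyCA alpha beta i 0 true = none := by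
  simp [applyCA, hi]

theorem insPos_perm (nw : String) (l : List String) : (insPosB nw l).Perm (nw :: l) := by
  induction l with
  | nil => simp [insPosB]
  | cons x xs ih =>
    unfold insPosB; split
    · exact (ih.cons x).trans (List.Perm.swap nw x xs)
    · exact List.Perm.refl _

theorem mem_insPos (nw y : String) (l : List String) : y ∈ insPosB nw l ↔ y = nw ∨ y ∈ l := by
  rw [(insPos_perm nw l).mem_iff]; simp

theorem insPos_pairwise (nw : String) (l : List String)
    (h : l.Pairwise (fun a b => a.toList ≤ b.toList)) :
    (insPosB nw l).Pairwise (fun a b => a.toList ≤ b.toList) := by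
  induction l with
  | nil => simp [insPosB]
  | cons x xs ih =>
    rw [List.pairwise_cons] at h
    unfold insPosB; split
    · next hlt =>
      rw [List.pairwise_cons]
      refine ⟨?_, ih h.2⟩
      intro y hy
      rcases (mem_insPos nw y xs).mp hy with rfl | hy'
      · exact le_of_lt hlt
      · exact h.1 y hy'
    · next hge =>
      rw [List.pairwise_cons]
      refine ⟨?_, List.pairwise_cons.mpr h⟩
      intro y hy
      rcases List.mem_cons.mp hy with rfl | hy'
      · exact le_of_not_gt hge
      · exact le_trans (le_of_not_gt hge) (h.1 y hy')

theorem pairwise_lt_of_le_nodup (l : List String)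
    (h : l.Pairwise (fun a b => a.toList ≤ b.toList)) (hnd : l.Nodup) :
    l.Pairwise (fun a b => a.toList < b.toList) := by
  have := List.Pairwise.and h hnd
  apply this.imp
  intro a b hab
  exact lt_of_le_of_ne hab.1 (fun e => hab.2 (by
    have : a = b := String.ext ?_
    · exact this
    · exact e))

theorem filter_ne_eq_discard (l : List String) (old : String) :
    l.filter (fun x => x ≠ old) = PySem.Set.discard l old := by
  unfold PySem.Set.discard
  apply List.filter_congr
  intro x _
  by_cases h : x = old <;> simp [h]

theorem nodup_insPos (nw : String) (l : List String) (hnd : l.Nodup) (hnw : nw ∉ l) :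
    (insPosB nw l).Nodup :=
  (insPos_perm nw l).nodup_iff.mpr (List.nodup_cons.mpr ⟨hnw, hnd⟩)

-- the Decidable-instance bridge: the ports' sorted (default instances) equals the
-- one the Mathlib-ordered PySem lemmas are stated with
theorem instEqLt : (fun (a b : List Char) =>
      @List.decidableLT Char instDecidableEqChar Char.instLT Char.instDecidableLt a b)
    = (@LinearOrder.toDecidableLT (List Char) List.instLinearOrder) := by
  funext a b
  exact Subsingleton.elim _ _

theorem sorted_inst_eq (xs : List String) :
    PySem.List.sorted xs (fun x => x.toList)
      = @PySem.List.sorted String (List Char) (@List.instLT Char Char.instLT)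
        (@LinearOrder.toDecidableLT (List Char) List.instLinearOrder) xs (fun x => x.toList) false :=
  congrArg (fun inst => @PySem.List.sorted String (List Char) (@List.instLT Char Char.instLT)
    inst xs (fun x => x.toList) false) instEqLt

theorem sorted_pairwise' (xs : List String) :
    (PySem.List.sorted xs (fun x => x.toList)).Pairwise (fun a b => a.toList ≤ b.toList) := by
  rw [sorted_inst_eq]
  exact PySem.List.sorted_pairwise xs (fun x => x.toList)

theorem sorted_eq_of_perm_of_pairwise_lt' (xs ys : List String)
    (hp : ys.Perm xs) (hlt : ys.Pairwise (fun a b => a.toList < b.toList)) :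
    PySem.List.sorted xs (fun x => x.toList) = ys := by
  rw [sorted_inst_eq]
  exact PySem.List.sorted_eq_of_perm_of_pairwise_lt xs ys (fun x => x.toList) hp hlt

theorem toList_injective : Function.Injective (fun (s : String) => s.toList) := by
  intro a b h
  exact String.ext h

theorem sorted_eq_sorted_of_perm' (xs ys : List String) (hp : xs.Perm ys) :
    PySem.List.sorted xs (fun x => x.toList) = PySem.List.sorted ys (fun x => x.toList) := by
  rw [sorted_inst_eq, sorted_inst_eq]
  exact PySem.List.sorted_eq_sorted_of_perm xs ys (fun x => x.toList) toList_injective hp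

-- sorted of ((L minus old) ++ [nw]) is B's sorted-insertion of nw into (sorted L minus old)
theorem sorted_surgery (L : List String) (hnd : L.Nodup) (old nw : String) (hnw : nw ∉ L) :
    PySem.List.sorted ((PySem.Set.discard L old) ++ [nw]) (fun x => x.toList)
      = insPosB nw ((PySem.List.sorted L (fun x => x.toList)).filter (fun x => x ≠ old)) := by
  have hsL : (PySem.List.sorted L (fun x => x.toList)).Perm L :=
    PySem.List.sorted_perm _ _ _
  have hfperm : ((PySem.List.sorted L (fun x => x.toList)).filter (fun x => x ≠ old)).Perm
      (PySem.Set.discard L old) := by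
    rw [← filter_ne_eq_discard]
    exact hsL.filter _
  have hperm : (insPosB nw ((PySem.List.sorted L (fun x => x.toList)).filter (fun x => x ≠ old))).Perm
      ((PySem.Set.discard L old) ++ [nw]) := by
    refine (insPos_perm _ _).trans ?_
    refine List.Perm.trans ?_ (List.perm_append_singleton nw _).symm
    exact hfperm.cons nw
  have hpw : (insPosB nw ((PySem.List.sorted L (fun x => x.toList)).filter (fun x => x ≠ old))).Pairwise
      (fun a b => a.toList ≤ b.toList) :=
    insPos_pairwise nw _ ((sorted_pairwise' L).filter _)
  have hpwlt := pairwise_lt_of_le_nodup _ hpw (by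
    apply nodup_insPos
    · exact (hsL.nodup_iff.mpr hnd).filter _
    · intro hmem
      exact hnw (hsL.mem_iff.mp (List.mem_of_mem_filter hmem)))
  exact sorted_eq_of_perm_of_pairwise_lt' _ _ hperm hpwlt

theorem perm_cons_discard (l : List String) (x : String) (hnd : l.Nodup) (hx : x ∈ l) :
    l.Perm (x :: PySem.Set.discard l x) := by
  rw [List.perm_ext_iff_of_nodup hnd (List.nodup_cons.mpr
    ⟨fun h => ((mem_discard l x x).mp h).2 rfl, nodup_discard l x hnd⟩)]
  intro a
  simp only [List.mem_cons, mem_discard]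
  by_cases h : a = x
  · subst h; simp [hx]
  · simp [h]

theorem len_discard (l : List String) (x : String) (hnd : l.Nodup) (hx : x ∈ l) :
    (PySem.Set.discard l x).length + 1 = l.length := by
  have := (perm_cons_discard l x hnd hx).length_eq
  simp only [List.length_cons] at this
  omega

theorem add_eq_append (l : List String) (x : String) (hx : x ∉ l) :
    PySem.Set.add l x = l ++ [x] := by
  unfold PySem.Set.add
  rw [if_neg]
  simp [PySem.Set.contains]
  intro h
  exact absurd (List.contains_iff_mem.mp (by simpa using h)) hx

theorem discard_append_singleton (l : List String) (j i : String) (hne : j ≠ i) :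
    PySem.Set.discard (l ++ [j]) i = PySem.Set.discard l i ++ [j] := by
  unfold PySem.Set.discard
  rw [List.filter_append]
  simp [hne]

theorem discard_append_self (l : List String) (j : String) (hj : j ∉ l) :
    PySem.Set.discard (l ++ [j]) j = l := by
  unfold PySem.Set.discard
  rw [List.filter_append]
  simp only [List.filter_cons, List.filter_nil]
  rw [List.filter_eq_self.mpr]
  · simp
  · intro a ha
    have hne : a ≠ j := fun e => hj (e ▸ ha)
    simp [hne]

-- range-indexed join equals zip-indexed join (equal lengths)
theorem rangeMap_eq_zipMap (f : String → String → String) :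
    ∀ (sa sb : List String), sa.length = sb.length →
    (List.range sa.length).map (fun k => f (sa.getD k "") (sb.getD k ""))
      = (sa.zip sb).map (fun p => f p.1 p.2) := by
  intro sa
  induction sa with
  | nil => intro sb h; simp
  | cons x xs ih =>
    intro sb h
    cases sb with
    | nil => simp at h
    | cons y ys =>
      simp only [List.length_cons, List.range_succ_eq_map, List.map_cons, List.map_map,
        List.zip_cons_cons]
      congr 1
      rw [← ih ys (by simpa using h)]
      apply List.map_congr_left
      intro k hk
      simp [Function.comp]

theorem countP_lt_discard (A : List String) (j : String) :
    (PySem.Set.discard A j).countP (fun x => x.toList < j.toList)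
      = A.countP (fun x => x.toList < j.toList) := by
  unfold PySem.Set.discard
  rw [List.countP_filter]
  apply List.countP_congr
  intro x hx
  by_cases h : x = j
  · subst h; simp
  · simp [h]

theorem cntLt_discard_left (A B : List String) (j : String) :
    cntLt (PySem.Set.discard A j) B j = cntLt A B j := by
  simp [cntLt, countP_lt_discard]

theorem cntLt_discard_right (A B : List String) (i : String) :
    cntLt A (PySem.Set.discard B i) i = cntLt A B i := by
  simp [cntLt, countP_lt_discard]

theorem canonDetA_some (a b : PySem.Set String) (h : a.length = b.length) :
    canonDetA a b = some (canonKeyB (PySem.List.sorted a (fun x => x.toList))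
      (PySem.List.sorted b (fun x => x.toList))) := by
  unfold canonDetA canonKeyB
  rw [if_neg (by simp [PySem.List.length_sorted, h])]
  congr 1
  congr 1
  rw [rangeMap_eq_zipMap (fun x y => PySem.Str.join "" [x, PySem.Str.upper y])
    _ _ (by simp [PySem.List.length_sorted, h])]

theorem canonDetA_none (a b : PySem.Set String) (h : a.length ≠ b.length) :
    canonDetA a b = none := by
  unfold canonDetA
  rw [if_pos (by simp [PySem.List.length_sorted, h])]

theorem main_eq (orbs alpha beta : List String) (hA : alpha.Nodup) (hB : beta.Nodup) :
    apply_s_pl_s_mi_py orbs alpha beta = apply_s_pl_s_mi_py_alt orbs alpha beta := by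
  unfold apply_s_pl_s_mi_py apply_s_pl_s_mi_py_alt
  by_cases hlen : alpha.length = beta.length
  · rw [if_neg (by simp [hlen])]
    apply congrArg PySem.Dict.items
    apply foldl_ext'
    intro out j
    by_cases hj : j ∈ alpha
    · by_cases hjb : j ∈ beta
      · -- j in both: inner loop never fires, B skips
        rw [applyCA_annih_a alpha beta j hA hB hj]
        have hBc : (alpha.contains j && !beta.contains j) = false := by
          simp [hjb]
        rw [hBc]
        simp only [Bool.false_eq_true, if_false]
        apply foldl_fix
        intro out2 i
        rw [applyCA_create_b_none _ _ j hjb]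
      · -- the live case : j in alpha, not in beta
        have hja1 : j ∉ PySem.Set.discard alpha j := fun h => ((mem_discard _ _ _).mp h).2 rfl
        have nd_a1 : (PySem.Set.discard alpha j).Nodup := nodup_discard _ _ hA
        have nd_b2 : (PySem.Set.add beta j).Nodup := nodup_add _ _ hB
        have hfc : List.contains (PySem.Set.discard alpha j) j = false :=
          Bool.eq_false_iff.mpr (fun h => hja1 (List.contains_iff_mem.mp h))
        rw [applyCA_annih_a alpha beta j hA hB hj]
        have hBc : (alpha.contains j && !beta.contains j) = true := by
          simp [hj, hjb]
        rw [hBc]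
        simp only [if_true]
        apply foldl_ext'
        intro out2 i
        rw [applyCA_create_b _ _ j nd_a1 hB hjb]
        simp only [hfc]
        simp only [Bool.false_eq_true, if_false, add_zero, cntLt_discard_left]
        by_cases hij : i = j
        · -- diagonal term: recreates the original determinant with sign +1
          subst hij
          have hib2 : i ∈ PySem.Set.add beta i := (PySem.Set.mem_add beta i i).mpr (Or.inr rfl)
          have nd_b3 : (PySem.Set.discard (PySem.Set.add beta i) i).Nodup := nodup_discard _ _ nd_b2
          rw [applyCA_annih_b _ _ i nd_a1 nd_b2 hib2]
          simp only [hfc]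
          simp only [Bool.false_eq_true, if_false, add_zero]
          rw [applyCA_create_a _ _ i nd_a1 nd_b3 hja1, cntLt_discard_right]
          dsimp only
          have hkey : canonDetA (PySem.Set.add (PySem.Set.discard alpha i) i)
              (PySem.Set.discard (PySem.Set.add beta i) i)
              = some (canonKeyB (PySem.List.sorted alpha (fun x => x.toList))
                  (PySem.List.sorted beta (fun x => x.toList))) := by
            rw [add_eq_append _ _ hja1, add_eq_append _ _ hjb, discard_append_self _ _ hjb]
            have hlen4 : (PySem.Set.discard alpha i ++ [i]).length = beta.length := by
              have := len_discard alpha i hA hj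
              simp only [List.length_append, List.length_cons, List.length_nil]
              omega
            rw [canonDetA_some _ _ hlen4]
            have hperm : (PySem.Set.discard alpha i ++ [i]).Perm alpha :=
              (List.perm_append_singleton i _).trans (perm_cons_discard alpha i hA hj).symm
            rw [sorted_eq_sorted_of_perm' _ _ hperm]
          rw [hkey]
          simp only [beq_self_eq_true, if_true]
          rw [sgn_four]
        · -- off-diagonal
          have hijb : (i == j) = false := beq_eq_false_iff_ne.mpr hij
          by_cases hib : i ∈ beta
          · by_cases hia : i ∈ alpha
            · -- i doubly occupied: last creation fails, B skips
              have hib2 : i ∈ PySem.Set.add beta j := (PySem.Set.mem_add beta j i).mpr (Or.inl hib)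
              rw [applyCA_annih_b _ _ i nd_a1 nd_b2 hib2]
              dsimp only
              rw [applyCA_create_a_none _ _ i ((mem_discard alpha j i).mpr ⟨hia, hij⟩)]
              have hBc2 : (beta.contains i && !alpha.contains i) = false := by
                simp [hia]
              rw [hijb, hBc2]
              simp
            · -- the exchange term
              have hia1 : i ∉ PySem.Set.discard alpha j :=
                fun h => hia ((mem_discard _ _ _).mp h).1
              have hfci : List.contains (PySem.Set.discard alpha j) i = false :=
                Bool.eq_false_iff.mpr (fun h => hia1 (List.contains_iff_mem.mp h))
              have hib2 : i ∈ PySem.Set.add beta j := (PySem.Set.mem_add beta j i).mpr (Or.inl hib)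
              have nd_b3 : (PySem.Set.discard (PySem.Set.add beta j) i).Nodup := nodup_discard _ _ nd_b2
              rw [applyCA_annih_b _ _ i nd_a1 nd_b2 hib2]
              simp only [hfci]
              simp only [Bool.false_eq_true, if_false, add_zero]
              rw [applyCA_create_a _ _ i nd_a1 nd_b3 hia1, cntLt_discard_right]
              dsimp only
              have hshape_b : PySem.Set.discard (PySem.Set.add beta j) i
                  = PySem.Set.discard beta i ++ [j] := by
                rw [add_eq_append _ _ hjb, discard_append_singleton _ _ _ (Ne.symm hij)]
              have hkey : canonDetA (PySem.Set.add (PySem.Set.discard alpha j) i)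
                  (PySem.Set.discard (PySem.Set.add beta j) i)
                  = some (canonKeyB
                      (replaceSortedB (PySem.List.sorted alpha (fun x => x.toList)) j i)
                      (replaceSortedB (PySem.List.sorted beta (fun x => x.toList)) i j)) := by
                rw [add_eq_append _ _ hia1, hshape_b]
                have hlen4 : (PySem.Set.discard alpha j ++ [i]).length
                    = (PySem.Set.discard beta i ++ [j]).length := by
                  have h1 := len_discard alpha j hA hj
                  have h2 := len_discard beta i hB hib
                  simp only [List.length_append, List.length_cons, List.length_nil]
                  omega
                rw [canonDetA_some _ _ hlen4]
                rw [sorted_surgery alpha hA j i hia, sorted_surgery beta hB i j hjb]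
                rfl
              rw [hkey]
              have hBc2 : (beta.contains i && !alpha.contains i) = true := by
                simp [hib, hia]
              rw [hijb, hBc2]
              simp only [Bool.false_eq_true, if_false, if_true]
              rw [sgn_four]
          · -- i unoccupied in beta: annihilation fails, B skips
            have hib2 : i ∉ PySem.Set.add beta j := by
              rw [PySem.Set.mem_add]
              rintro (h | h)
              · exact hib h
              · exact hij h
            rw [applyCA_annih_b_none _ _ i hib2]
            have hBc2 : (beta.contains i && !alpha.contains i) = false := by
              simp [hib]
            rw [hijb, hBc2]
            simp
    · -- j not in alpha: first annihilation fails, B skips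
      rw [applyCA_annih_a_none alpha beta j hj]
      have hBc : (alpha.contains j && !beta.contains j) = false := by
        simp [hj]
      rw [hBc]
      simp
  · -- unbalanced determinant: every canonical key is refused, both sides empty
    rw [if_pos (by simpa using hlen)]
    refine Eq.trans (congrArg PySem.Dict.items (foldl_fix _ orbs PySem.Dict.empty (fun out j => ?_))) rfl
    by_cases hj : j ∈ alpha
    · by_cases hjb : j ∈ beta
      · rw [applyCA_annih_a alpha beta j hA hB hj]
        apply foldl_fix
        intro out2 i
        rw [applyCA_create_b_none _ _ j hjb]
      · have hja1 : j ∉ PySem.Set.discard alpha j := fun h => ((mem_discard _ _ _).mp h).2 rfl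
        have nd_a1 : (PySem.Set.discard alpha j).Nodup := nodup_discard _ _ hA
        have nd_b2 : (PySem.Set.add beta j).Nodup := nodup_add _ _ hB
        have hfc : List.contains (PySem.Set.discard alpha j) j = false :=
          Bool.eq_false_iff.mpr (fun h => hja1 (List.contains_iff_mem.mp h))
        rw [applyCA_annih_a alpha beta j hA hB hj]
        apply foldl_fix
        intro out2 i
        rw [applyCA_create_b _ _ j nd_a1 hB hjb]
        simp only [hfc]
        simp only [Bool.false_eq_true, if_false, add_zero]
        by_cases hij : i = j
        · subst hij
          have hib2 : i ∈ PySem.Set.add beta i := (PySem.Set.mem_add beta i i).mpr (Or.inr rfl)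
          have nd_b3 : (PySem.Set.discard (PySem.Set.add beta i) i).Nodup := nodup_discard _ _ nd_b2
          rw [applyCA_annih_b _ _ i nd_a1 nd_b2 hib2]
          simp only [hfc]
          simp only [Bool.false_eq_true, if_false, add_zero]
          rw [applyCA_create_a _ _ i nd_a1 nd_b3 hja1]
          dsimp only
          rw [canonDetA_none]
          rw [add_eq_append _ _ hja1, add_eq_append _ _ hjb, discard_append_self _ _ hjb]
          have := len_discard alpha i hA hj
          simp only [List.length_append, List.length_cons, List.length_nil]
          omega
        · by_cases hib : i ∈ beta
          · by_cases hia : i ∈ alpha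
            · have hib2 : i ∈ PySem.Set.add beta j := (PySem.Set.mem_add beta j i).mpr (Or.inl hib)
              rw [applyCA_annih_b _ _ i nd_a1 nd_b2 hib2]
              dsimp only
              rw [applyCA_create_a_none _ _ i ((mem_discard alpha j i).mpr ⟨hia, hij⟩)]
            · have hia1 : i ∉ PySem.Set.discard alpha j :=
                fun h => hia ((mem_discard _ _ _).mp h).1
              have hfci : List.contains (PySem.Set.discard alpha j) i = false :=
                Bool.eq_false_iff.mpr (fun h => hia1 (List.contains_iff_mem.mp h))
              have hib2 : i ∈ PySem.Set.add beta j := (PySem.Set.mem_add beta j i).mpr (Or.inl hib)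
              have nd_b3 : (PySem.Set.discard (PySem.Set.add beta j) i).Nodup := nodup_discard _ _ nd_b2
              rw [applyCA_annih_b _ _ i nd_a1 nd_b2 hib2]
              simp only [hfci]
              simp only [Bool.false_eq_true, if_false, add_zero]
              rw [applyCA_create_a _ _ i nd_a1 nd_b3 hia1]
              dsimp only
              rw [canonDetA_none]
              rw [add_eq_append _ _ hia1, add_eq_append _ _ hjb,
                discard_append_singleton _ _ _ (Ne.symm hij)]
              have h1 := len_discard alpha j hA hj
              have h2 := len_discard beta i hB hib
              simp only [List.length_append, List.length_cons, List.length_nil]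
              omega
          · have hib2 : i ∉ PySem.Set.add beta j := by
              rw [PySem.Set.mem_add]
              rintro (h | h)
              · exact hib h
              · exact hij h
            rw [applyCA_annih_b_none _ _ i hib2]
    · rw [applyCA_annih_a_none alpha beta j hj]


-- ===== VERDICT (by name: the statement is the Claim_ definition above) =====
theorem apply_s_pl_s_mi_py_spec : Claim_equal_apply_s_pl_s_mi_py := by
  intro orbs alpha beta _hdom hpre
  exact main_eq orbs alpha beta hpre.1 hpre.2
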